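-- pv_equiv track=rewrite | github.com/my7370455-art/2025_fall_python_assignment | dawn_before_final/interesting_drink.py | interesting_drink
-- ===== SOURCE A (Python) =====
-- def interesting_drink(prices, m_values) -> int:
--     results = []
--     prices.sort()
--     for m in m_values:
--         # Binary search to find the number of shops with price <= m
--         left, right = 0, len(prices)
--         while left < right:
--             mid = (left + right) // 2
--             if prices[mid] <= m:
--                 left = mid + 1
--             else:
--                 right = mid
--         results.append(left)
--     return max(results)
-- ===== SOURCE B (Python) =====
-- def interesting_drink(prices, m_values) -> int:
--     # count is monotone in the budget, so the answer is the count at the largest budget;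
--     # no sort, no per-query binary search, and prices is not mutated (A sorts it in place)
--     mx = max(m_values)
--     count = 0
--     for p in prices:
--         if p <= mx:
--             count += 1
--     return count
-- ===== Notes on version B (the rewrite author's own statement) =====
-- stated objective: faster
-- what changed: Replaced sort-then-binary-search-per-query with a single linear count of prices not exceeding max(m_values), using monotonicity of the count in the budget.
import Mathlib
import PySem

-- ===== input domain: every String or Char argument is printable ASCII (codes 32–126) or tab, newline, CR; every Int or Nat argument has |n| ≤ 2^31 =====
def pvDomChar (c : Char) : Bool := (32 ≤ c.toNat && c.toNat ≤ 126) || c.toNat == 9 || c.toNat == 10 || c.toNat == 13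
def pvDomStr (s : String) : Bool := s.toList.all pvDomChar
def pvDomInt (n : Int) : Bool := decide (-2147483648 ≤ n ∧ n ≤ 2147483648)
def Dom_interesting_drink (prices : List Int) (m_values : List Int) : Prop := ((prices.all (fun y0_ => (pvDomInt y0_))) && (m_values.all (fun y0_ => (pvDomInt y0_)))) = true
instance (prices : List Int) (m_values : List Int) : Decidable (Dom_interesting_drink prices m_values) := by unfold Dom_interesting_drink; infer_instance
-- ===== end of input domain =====

-- B replaces sort + per-query binary search by one linear count at max(m_values) (count is
-- monotone in the budget); equivalence is about the RETURN value only — Python A sorts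
-- `prices` in place, B does not mutate it.

-- ===== PORT A =====
-- midpoint bounds for the while loop's termination (used by pvBS's decreasing_by)
lemma pvBS_measure₁ (left right : Int) (h : left < right) :
    (right - (PySem.Int.floordiv (left + right) 2 + 1)).toNat < (right - left).toNat := by
  have h1 : left ≤ PySem.Int.floordiv (left + right) 2 :=
    (PySem.Int.le_floordiv_iff_mul_le (by omega)).mpr (by omega)
  omega

lemma pvBS_measure₂ (left right : Int) (h : left < right) :
    (PySem.Int.floordiv (left + right) 2 - left).toNat < (right - left).toNat := by
  have h2 : PySem.Int.floordiv (left + right) 2 < right :=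
    (PySem.Int.floordiv_lt_iff_lt_mul (by omega)).mpr (by omega)
  omega

-- the hand-written while-loop binary search of A, step for step
def pvBS (sp : List Int) (m : Int) (left right : Int) : Int :=
  if h' : left < right then
    let mid := PySem.Int.floordiv (left + right) 2
    if PySem.List.pyGetD sp mid 0 ≤ m then pvBS sp m (mid + 1) right
    else pvBS sp m left mid
  else left
termination_by (right - left).toNat
decreasing_by
  · exact pvBS_measure₁ left right h'
  · exact pvBS_measure₂ left right h'

def interesting_drink (prices : List Int) (m_values : List Int) : Int :=
  let sp := PySem.List.sorted prices (fun x => x)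
  let results := m_values.foldl (fun acc m => acc ++ [pvBS sp m 0 (sp.length : Int)]) []
  (PySem.List.max? results (fun x => x)).getD 0  -- max([]) raises: excluded by Pre_

-- ===== PORT B =====
def interesting_drink_alt (prices : List Int) (m_values : List Int) : Int :=
  let mx := (PySem.List.max? m_values (fun x => x)).getD 0  -- max([]) raises: excluded by Pre_
  prices.foldl (fun acc p => if p ≤ mx then acc + 1 else acc) (0 : Int)

-- ===== PRECONDITION & SPEC =====
-- Pre_ excludes empty m_values, on which both Pythons raise ValueError (max of empty sequence).
def Pre_interesting_drink (prices : List Int) (m_values : List Int) : Prop := m_values ≠ []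
instance (prices : List Int) (m_values : List Int) : Decidable (Pre_interesting_drink prices m_values) := by
  unfold Pre_interesting_drink; infer_instance
def pvWitness_interesting_drink : List Int × List Int := ([3, 1, 2], [2, 5])
def Spec_interesting_drink (prices : List Int) (m_values : List Int) (out : Int) : Prop := out = interesting_drink_alt prices m_values
instance (prices : List Int) (m_values : List Int) (out : Int) : Decidable (Spec_interesting_drink prices m_values out) := by unfold Spec_interesting_drink; infer_instance

-- ===== CLAIM (what is proved, stated in full; the proofs are below) =====
def Claim_equal_interesting_drink : Prop := ∀ (prices : List Int) (m_values : List Int), Dom_interesting_drink prices m_values → Pre_interesting_drink prices m_values → Spec_interesting_drink prices m_values (interesting_drink prices m_values)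

-- ===== LEMMAS AND PROOFS =====

-- If a prefix of length l satisfies the predicate and the rest does not, countP is l.
lemma countP_of_split (xs : List Int) (m : Int) (l : Nat) (hl : l ≤ xs.length)
    (hpre : ∀ (j : Nat) (hj : j < xs.length), j < l → xs[j] ≤ m)
    (hsuf : ∀ (j : Nat) (hj : j < xs.length), l ≤ j → m < xs[j]) :
    xs.countP (fun p => p ≤ m) = l := by
  conv_lhs => rw [← List.take_append_drop l xs]
  rw [List.countP_append]
  have h1 : (xs.take l).countP (fun p => p ≤ m) = (xs.take l).length := by
    rw [List.countP_eq_length]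
    intro a ha
    obtain ⟨i, hi, rfl⟩ := List.mem_iff_getElem.mp ha
    have hi' : i < xs.length := by simp at hi; omega
    rw [List.getElem_take]
    simpa using hpre i hi' (by simp at hi; omega)
  have h2 : (xs.drop l).countP (fun p => p ≤ m) = 0 := by
    rw [List.countP_eq_zero]
    intro a ha
    obtain ⟨i, hi, rfl⟩ := List.mem_iff_getElem.mp ha
    have hi' : l + i < xs.length := by simp at hi; omega
    rw [List.getElem_drop]
    simpa using not_le.mpr (hsuf (l + i) hi' (by omega))
  simp [h1, h2, hl]

-- the while loop on a sorted list computes countP (· ≤ m)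
lemma pvBS_eq (sp : List Int) (m : Int) (hs : sp.Pairwise (· ≤ ·)) :
    ∀ (n : Nat) (l r : Int), (r - l).toNat = n → 0 ≤ l → l ≤ r → r ≤ sp.length →
    (∀ (j : Nat) (hj : j < sp.length), (j : Int) < l → sp[j] ≤ m) →
    (∀ (j : Nat) (hj : j < sp.length), r ≤ (j : Int) → m < sp[j]) →
    pvBS sp m l r = (sp.countP (fun p => p ≤ m) : Int) := by
  intro n
  induction n using Nat.strong_induction_on with
  | _ n ih =>
    intro l r hn h0 hlr hrlen hpre hsuf
    rw [pvBS]
    by_cases hlt : l < r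
    · simp only [hlt, dite_true]
      set mid := PySem.Int.floordiv (l + r) 2 with hmid
      have h1 : l ≤ mid := (PySem.Int.le_floordiv_iff_mul_le (by omega)).mpr (by omega)
      have h2 : mid < r := (PySem.Int.floordiv_lt_iff_lt_mul (by omega)).mpr (by omega)
      have hmidlen : mid < (sp.length : Int) := by omega
      have hget : PySem.List.pyGetD sp mid 0 = sp[mid.toNat]'(by omega) :=
        PySem.List.pyGetD_eq_getElem sp 0 (by omega) hmidlen
      have hmono : ∀ (i j : Nat) (hi : i < sp.length) (hj : j < sp.length),
          i ≤ j → sp[i] ≤ sp[j] := by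
        intro i j hi hj hij
        rcases Nat.lt_or_ge i j with h | h
        · exact List.pairwise_iff_getElem.mp hs i j hi hj h
        · have : i = j := by omega
          subst this; exact le_refl _
      by_cases hc : PySem.List.pyGetD sp mid 0 ≤ m
      · simp only [hc, if_true]
        refine ih ((r - (mid + 1)).toNat) (by omega) (mid + 1) r rfl (by omega) (by omega)
          hrlen ?_ hsuf
        intro j hj hjl
        have : sp[j] ≤ sp[mid.toNat]'(by omega) := hmono j mid.toNat hj (by omega) (by omega)
        rw [hget] at hc; omega
      · simp only [hc, if_false]
        refine ih ((mid - l).toNat) (by omega) l mid rfl h0 (by omega) (by omega) hpre ?_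
        intro j hj hjge
        have : sp[mid.toNat]'(by omega) ≤ sp[j] := hmono mid.toNat j (by omega) hj (by omega)
        rw [hget] at hc; omega
    · simp only [hlt, dite_false]
      have hlr' : l = r := by omega
      have : sp.countP (fun p => p ≤ m) = l.toNat := by
        refine countP_of_split sp m l.toNat (by omega) ?_ ?_
        · intro j hj hjl; exact hpre j hj (by omega)
        · intro j hj hjl; exact hsuf j hj (by omega)
      omega

-- max? with identity key returns an element of the list (when nonempty)
lemma max?_cons_cons (a x : Int) (xs : List Int) :
    PySem.List.max? (a :: x :: xs) (fun y => y) =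
      PySem.List.max? ((if a < x then x else a) :: xs) (fun y => y) := by
  by_cases h : a < x <;> simp [PySem.List.max?, h]

lemma max?_some_mem (xs : List Int) (hne : xs ≠ []) :
    ∃ v, PySem.List.max? xs (fun y => y) = some v ∧ v ∈ xs := by
  cases xs with
  | nil => cases hne rfl
  | cons a xs =>
    clear hne
    induction xs generalizing a with
    | nil => exact ⟨a, rfl, by simp⟩
    | cons x xs ih =>
      rw [max?_cons_cons]
      obtain ⟨v, hv, hm⟩ := ih (if a < x then x else a)
      refine ⟨v, hv, ?_⟩
      rcases List.mem_cons.mp hm with heq | hmem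
      · subst heq; split <;> simp
      · simp [hmem]

-- ===== VERDICT (by name: the statement is the Claim_ definition above) =====
theorem interesting_drink_spec : Claim_equal_interesting_drink := by
  intro prices m_values _hdom hpre
  unfold Spec_interesting_drink
  have hperm : (PySem.List.sorted prices (fun x => x)).Perm prices :=
    PySem.List.sorted_perm prices (fun x => x) false
  have hpair : (PySem.List.sorted prices (fun x => x)).Pairwise (· ≤ ·) :=
    PySem.List.sorted_pairwise prices (fun x => x)
  set sp := PySem.List.sorted prices (fun x => x) with hsp
  -- zeta-reduce both ports (definitional)
  have hA : interesting_drink prices m_values =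
      (PySem.List.max?
        (m_values.foldl (fun acc m => acc ++ [pvBS sp m 0 (sp.length : Int)]) [])
        (fun x => x)).getD 0 := rfl
  have hB : interesting_drink_alt prices m_values =
      prices.foldl
        (fun acc p => if p ≤ (PySem.List.max? m_values (fun x => x)).getD 0 then acc + 1 else acc)
        (0 : Int) := rfl
  rw [hA, hB]
  -- each query's binary search result is the count
  have hbs : ∀ m : Int, pvBS sp m 0 (sp.length : Int) = (sp.countP (fun p => p ≤ m) : Int) := by
    intro m
    refine pvBS_eq sp m hpair _ 0 (sp.length : Int) rfl le_rfl (by omega) le_rfl ?_ ?_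
    · intro j hj hjl; omega
    · intro j hj hjr; omega
  set f : Int → Int := fun m => (sp.countP (fun p => p ≤ m) : Int) with hf
  have hres : m_values.foldl (fun acc m => acc ++ [pvBS sp m 0 (sp.length : Int)]) [] =
      m_values.map f := by
    rw [PySem.List.foldl_append_singleton_eq_map (fun m => pvBS sp m 0 (sp.length : Int))]
    simp only [List.nil_append]
    exact List.map_congr_left (fun m _ => hbs m)
  rw [hres]
  -- the maxima
  obtain ⟨mx, hmx, hmxmem⟩ := max?_some_mem m_values hpre
  have hmxmax : ∀ y ∈ m_values, y ≤ mx := fun y hy => PySem.List.max?_isMax hmx y hy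
  have hmapne : m_values.map f ≠ [] := by
    cases m_values with
    | nil => exact absurd rfl hpre
    | cons a l => simp
  obtain ⟨v, hv, hvmem⟩ := max?_some_mem (m_values.map f) hmapne
  have hmono : ∀ a b : Int, a ≤ b → f a ≤ f b := by
    intro a b hab
    simp only [hf, Int.ofNat_le]
    exact List.countP_mono_left (fun x _ hx => by simp at hx ⊢; omega)
  have hveq : v = f mx := by
    obtain ⟨y, hy, rfl⟩ := List.mem_map.mp hvmem
    have h1 : f y ≤ f mx := hmono y mx (hmxmax y hy)
    have h2 : f mx ≤ f y :=
      PySem.List.max?_isMax hv (f mx) (List.mem_map.mpr ⟨mx, hmxmem, rfl⟩)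
    omega
  rw [hv, hmx]
  simp only [Option.getD_some, hveq]
  -- B's fold is the count over the (unsorted) prices
  have hcount := PySem.List.foldl_count_if (fun p => decide (p ≤ mx)) prices 0
  simp only [decide_eq_true_eq, zero_add] at hcount
  simp only [hf]
  rw [show List.countP (fun p => decide (p ≤ mx)) sp =
      List.countP (fun p => decide (p ≤ mx)) prices from hperm.countP_eq _]
  exact hcount.symm
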